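-- pv_equiv track=rewrite | github.com/Coveochatbot/megageniale-mlapi | mlapi/discriminating_algo.py | get_values_by_facet
-- ===== SOURCE A (Python) =====
-- def get_values_by_facet(unique_documents_by_facet):
--     values_by_facet = {}
--     unique_facets = []
--     if unique_documents_by_facet:
--         for facet, documents in unique_documents_by_facet.items():
--             if facet[0] not in unique_facets:
--                 values_by_facet[facet[0]] = [facet[1]]
--                 unique_facets.append(facet[0])
--             elif facet[0] in unique_facets:
--                 values_by_facet[facet[0]].append(facet[1])
--     return values_by_facet
-- ===== SOURCE B (Python) =====
-- def get_values_by_facet(unique_documents_by_facet):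
--     pairs = [(facet[0], facet[1]) for facet in unique_documents_by_facet]
--     values_by_facet = {}
--     while pairs:
--         name = pairs[0][0]
--         values_by_facet[name] = [value for key, value in pairs if key == name]
--         pairs = [(key, value) for key, value in pairs if key != name]
--     return values_by_facet
-- ===== Notes on version B (the rewrite author's own statement) =====
-- stated objective: alternative
-- what changed: A makes one incremental scan appending each value into a growing per-name bucket (guarded by a seen-names membership list); B instead repeatedly PARTITIONS the remaining pair list by its first name, emitting that whole group at once and recursing on the leftover pairs, so no buckets, no appends and no membership test exist.
import Mathlib
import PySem

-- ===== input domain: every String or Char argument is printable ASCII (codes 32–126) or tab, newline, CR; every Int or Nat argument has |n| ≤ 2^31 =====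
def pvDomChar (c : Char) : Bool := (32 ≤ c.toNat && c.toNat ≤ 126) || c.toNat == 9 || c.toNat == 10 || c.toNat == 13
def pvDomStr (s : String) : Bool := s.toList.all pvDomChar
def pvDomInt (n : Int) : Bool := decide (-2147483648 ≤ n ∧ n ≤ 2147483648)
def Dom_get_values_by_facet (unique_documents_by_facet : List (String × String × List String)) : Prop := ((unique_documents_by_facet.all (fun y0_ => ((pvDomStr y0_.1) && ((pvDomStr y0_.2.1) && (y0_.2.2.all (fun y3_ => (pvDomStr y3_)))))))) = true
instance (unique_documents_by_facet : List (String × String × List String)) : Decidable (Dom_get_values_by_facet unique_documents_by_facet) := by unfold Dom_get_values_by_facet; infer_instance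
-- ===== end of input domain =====

-- B replaces A's incremental scan-and-bucket (growing dict buckets + a seen-names membership list)
-- by repeated partition: emit the whole group of the first remaining facet name in one filter pass,
-- then loop on the pairs with other names (objective: alternative decomposition, similar cost).

-- ===== PORT A =====
-- A's loop: state (values_by_facet, unique_facets); branches in A's order
def pvGoA : List (String × String × List String) → PySem.Dict String (List String) → List String → PySem.Dict String (List String)
  | [], values_by_facet, _ => values_by_facet
  | f :: rest, values_by_facet, unique_facets =>
    if !(unique_facets.contains f.1) then
      pvGoA rest (values_by_facet.insert f.1 [f.2.1]) (unique_facets ++ [f.1])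
    else if unique_facets.contains f.1 then
      -- values_by_facet[facet[0]].append(facet[1]); key is present here, so modify is exact
      pvGoA rest (values_by_facet.modify f.1 [] (fun v => v ++ [f.2.1])) unique_facets
    else
      pvGoA rest values_by_facet unique_facets

def get_values_by_facet (unique_documents_by_facet : List (String × String × List String)) : List (String × List String) :=
  let values_by_facet : PySem.Dict String (List String) := PySem.Dict.empty
  (if unique_documents_by_facet ≠ [] then
    pvGoA unique_documents_by_facet values_by_facet []
  else values_by_facet).items

-- ===== PORT B =====
-- B's while loop: state (pairs, values_by_facet); each turn takes the first remaining name,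
-- emits its whole group, and keeps only the pairs with other names.  `name` is new every turn
-- (all its pairs were just removed), so `values_by_facet[name] = …` appends a fresh key.
def pvGroupB : List (String × String) → List (String × List String) → List (String × List String)
  | [], values_by_facet => values_by_facet
  | p :: rest, values_by_facet =>
    pvGroupB ((p :: rest).filter (fun q => q.1 != p.1))
      (values_by_facet ++ [(p.1, ((p :: rest).filter (fun q => q.1 == p.1)).map (fun q => q.2))])
  termination_by l => l.length
  decreasing_by
    simp only [List.filter_cons, bne_self_eq_false, Bool.false_eq_true, if_false]
    exact Nat.lt_succ_of_le (List.length_filter_le _ _)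

def get_values_by_facet_alt (unique_documents_by_facet : List (String × String × List String)) : List (String × List String) :=
  pvGroupB (unique_documents_by_facet.map (fun facet => (facet.1, facet.2.1))) []

-- ===== PRECONDITION & SPEC =====
def Spec_get_values_by_facet (unique_documents_by_facet : List (String × String × List String)) (out : List (String × List String)) : Prop := out = get_values_by_facet_alt unique_documents_by_facet
instance (unique_documents_by_facet : List (String × String × List String)) (out : List (String × List String)) : Decidable (Spec_get_values_by_facet unique_documents_by_facet out) := by unfold Spec_get_values_by_facet; infer_instance

-- ===== CLAIM (what is proved, stated in full; the proofs are below) =====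
def Claim_equal_get_values_by_facet : Prop := ∀ (unique_documents_by_facet : List (String × String × List String)), Dom_get_values_by_facet unique_documents_by_facet → Spec_get_values_by_facet unique_documents_by_facet (get_values_by_facet unique_documents_by_facet)

-- ===== LEMMAS AND PROOFS =====

-- the common canonical form: distinct names in first-appearance order, each with all its values
def pvCanon (l : List (String × String)) : List (String × List String) :=
  (PySem.Set.ofList (l.map (fun q => q.1))).map
    (fun k => (k, (l.filter (fun q => q.1 == k)).map (fun q => q.2)))

-- A's loop is the canonical grouping fold: both branches are a `modify … (· ++ [value])`,
-- and `unique_facets` tracks the dict's keys.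
theorem pvGoA_eq_foldl (l : List (String × String × List String))
    (d : PySem.Dict String (List String)) (names : List String) (h : names = d.keys) :
    pvGoA l d names = l.foldl (fun d p => d.modify p.1 [] (fun v => v ++ [p.2.1])) d := by
  induction l generalizing d names with
  | nil => simp [pvGoA]
  | cons f rest ih =>
    by_cases hc : names.contains f.1
    · have hdc : d.contains f.1 = true := by
        rw [PySem.Dict.contains_iff_mem_keys, ← h]
        exact List.contains_iff_mem.mp hc
      simp only [pvGoA, hc, Bool.not_true, ite_false, Bool.false_eq_true, ite_true, List.foldl_cons]
      apply ih
      rw [h, PySem.Dict.modify, PySem.Dict.keys_insert_of_contains _ _ hdc]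
    · have hdc : d.contains f.1 = false := by
        rw [Bool.eq_false_iff]
        intro hcon
        rw [PySem.Dict.contains_iff_mem_keys, ← h] at hcon
        simp only [List.contains_iff_mem] at hc
        exact hc hcon
      have hgd : d.getD f.1 [] = [] := PySem.Dict.getD_of_not_contains d [] hdc
      have hins : d.insert f.1 [f.2.1] = d.modify f.1 [] (fun v => v ++ [f.2.1]) := by
        rw [PySem.Dict.modify, hgd]
        rfl
      simp only [pvGoA, hc, Bool.not_false, List.foldl_cons, if_true]
      rw [hins]
      apply ih
      rw [h, PySem.Dict.modify, hgd, PySem.Dict.keys_insert_of_not_contains d _ hdc]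

-- A's dict, read out as items, is the canonical grouping of the (name, value) pairs
theorem pvA_items_eq_canon (l : List (String × String × List String)) :
    (l.foldl (fun d p => d.modify p.1 [] (fun v => v ++ [p.2.1]))
      (PySem.Dict.empty : PySem.Dict String (List String))).items
    = pvCanon (l.map (fun f => (f.1, f.2.1))) := by
  have hfold : List.foldl (fun d p => d.modify p.1 [] (fun v => v ++ [p.2.1]))
      (PySem.Dict.empty : PySem.Dict String (List String)) l
      = List.foldl (fun d p => d.modify p.1 [] (fun v => v ++ [p.2]))
          (PySem.Dict.empty : PySem.Dict String (List String))
          (l.map (fun f => (f.1, f.2.1))) := by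
    rw [List.foldl_map]
  rw [hfold]
  set pairs := l.map (fun f => (f.1, f.2.1)) with hp
  have hnd : (List.foldl (fun d p => d.modify p.1 [] fun v => v ++ [p.2])
      (PySem.Dict.empty : PySem.Dict String (List String)) pairs).keys.Nodup :=
    PySem.Dict.nodup_keys_foldl_modify_key pairs (fun p => p.1) []
      (fun _ p => fun v => v ++ [p.2]) PySem.Dict.empty (by simp [PySem.Dict.keys_empty])
  rw [PySem.Dict.items_eq_map_keys _ hnd []]
  have hk : (List.foldl (fun d p => d.modify p.1 [] fun v => v ++ [p.2])
      (PySem.Dict.empty : PySem.Dict String (List String)) pairs).keys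
      = PySem.Set.ofList (pairs.map (fun q => q.1)) := by
    rw [PySem.Dict.keys_foldl_modify_key pairs (fun p => p.1) [] (fun _ p => fun v => v ++ [p.2]),
      PySem.Dict.keys_empty, PySem.Set.update_nil_left]
  rw [hk, pvCanon]
  apply List.map_congr_left
  intro k _
  rw [PySem.Dict.getD_foldl_modify_append, PySem.Dict.getD_empty, List.nil_append]

-- adding an element commutes with filtering the set's element list
theorem pvAdd_filter (s : PySem.Set String) (x : String) (p : String → Bool) :
    (PySem.Set.add s x).filter p = if p x then PySem.Set.add (s.filter p) x else s.filter p := by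
  simp only [PySem.Set.add, PySem.Set.contains, List.contains_iff_mem]
  by_cases hp : p x
  · by_cases hc : x ∈ s
    · simp [hp, hc]
    · have hnc : ¬ x ∈ List.filter p s := by
        intro h; exact hc (List.mem_filter.mp h).1
      simp [hp, hc, hnc, List.filter_append]
  · by_cases hc : x ∈ s <;> simp [hp, hc, List.filter_append]

theorem pvFoldl_add_filter (t : List String) (p : String → Bool) :
    ∀ s : PySem.Set String,
      (t.foldl PySem.Set.add s).filter p = (t.filter p).foldl PySem.Set.add (s.filter p) := by
  induction t with
  | nil => intro s; rfl
  | cons x t ih =>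
    intro s
    simp only [List.foldl_cons, List.filter_cons]
    rw [ih, pvAdd_filter]
    by_cases hp : p x <;> simp [hp]

-- Set.ofList commutes with filter
theorem pvOfList_filter (t : List String) (p : String → Bool) :
    PySem.Set.ofList (t.filter p) = (PySem.Set.ofList t).filter p := by
  rw [PySem.Set.ofList_eq_foldl, PySem.Set.ofList_eq_foldl, pvFoldl_add_filter]
  rfl

-- dedup of a cons: head first, then dedup of the tail with the head's copies removed
theorem pvOfList_cons_filter (a : String) (t : List String) :
    PySem.Set.ofList (a :: t) = a :: PySem.Set.ofList (t.filter (fun x => x != a)) := by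
  have h1 : PySem.Set.ofList (a :: t) = PySem.Set.update [a] t := by
    rw [PySem.Set.ofList_eq_foldl]
    simp [List.foldl_cons, PySem.Set.add, PySem.Set.contains, PySem.Set.update]
  rw [h1, PySem.Set.update_eq_append_filter, pvOfList_filter, List.singleton_append]
  congr 1
  apply List.filter_congr
  intro y _
  simp only [PySem.Set.contains, bne]
  by_cases h : y = a <;> simp [h]

-- one turn of B's partition loop peels exactly the head group of the canonical form
theorem pvCanon_cons (x : String × String) (rest : List (String × String)) :
    pvCanon (x :: rest)
    = (x.1, ((x :: rest).filter (fun q => q.1 == x.1)).map (fun q => q.2))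
        :: pvCanon ((x :: rest).filter (fun q => q.1 != x.1)) := by
  have hhead : (x :: rest).filter (fun q => q.1 != x.1) = rest.filter (fun q => q.1 != x.1) := by
    simp
  rw [pvCanon, List.map_cons, pvOfList_cons_filter, List.map_cons]
  congr 1
  have hmapf : (rest.map (fun q => q.1)).filter (fun k => k != x.1)
      = (rest.filter (fun q => q.1 != x.1)).map (fun q => q.1) := by
    rw [List.filter_map]; rfl
  rw [hmapf, hhead, pvCanon]
  apply List.map_congr_left
  intro k hk
  have hk' : k ≠ x.1 := by
    rw [PySem.Set.mem_ofList] at hk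
    obtain ⟨q, hq, rfl⟩ := List.mem_map.mp hk
    have := (List.mem_filter.mp hq).2
    simpa using this
  congr 1
  rw [List.filter_cons]
  have : ((x.1 == k) = false) := by simpa using fun h => hk' h.symm
  simp only [this, Bool.false_eq_true, if_false, List.filter_filter]
  congr 1
  apply List.filter_congr
  intro q _
  by_cases h : q.1 = k <;> simp [h, hk']

-- B's loop produces the canonical grouping, appended to its accumulator
theorem pvGroupB_eq_canon (l : List (String × String)) (acc : List (String × List String)) :
    pvGroupB l acc = acc ++ pvCanon l := by
  induction l, acc using pvGroupB.induct with
  | case1 acc => simp [pvGroupB, pvCanon, PySem.Set.ofList, PySem.Set.empty]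
  | case2 p rest acc ih =>
    rw [pvGroupB, ih, pvCanon_cons]
    simp

theorem get_values_by_facet_spec : Claim_equal_get_values_by_facet := by
  intro l _
  unfold Spec_get_values_by_facet get_values_by_facet get_values_by_facet_alt
  rw [pvGroupB_eq_canon, List.nil_append]
  by_cases hl : l = []
  · subst hl
    simp [pvCanon, PySem.Set.ofList, PySem.Set.empty, PySem.Dict.empty]
  · simp only [ne_eq, hl, not_false_eq_true, if_true]
    rw [pvGoA_eq_foldl l PySem.Dict.empty [] (PySem.Dict.keys_empty).symm]
    exact pvA_items_eq_canon l
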